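-- pv_equiv track=rewrite | github.com/gajeshbhat/binarySearch-Programming-Puzzles | roomba.py | solve
-- ===== SOURCE A (Python) =====
-- def solve(moves, x, y):
--     start_x = 0
--     start_y = 0
--
--     for move in moves:
--         if move == "NORTH":
--             start_y += 1
--         elif move == "SOUTH":
--             start_y -= 1
--         elif move == "WEST":
--             start_x -= 1
--         else:
--             start_x += 1
--     return start_x == x and start_y == y
-- ===== SOURCE B (Python) =====
-- def solve(moves, x, y):
--     n = moves.count("NORTH")
--     s = moves.count("SOUTH")
--     w = moves.count("WEST")
--     return (len(moves) - n - s - w) - w == x and n - s == y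
-- ===== Notes on version B (the rewrite author's own statement) =====
-- stated objective: idiomatic
-- what changed: Replaced the branching accumulation loop by tallying the moves (list.count) and computing the final position in closed form, with EAST derived as total minus the three named counts so unknown moves behave identically.
import Mathlib
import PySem

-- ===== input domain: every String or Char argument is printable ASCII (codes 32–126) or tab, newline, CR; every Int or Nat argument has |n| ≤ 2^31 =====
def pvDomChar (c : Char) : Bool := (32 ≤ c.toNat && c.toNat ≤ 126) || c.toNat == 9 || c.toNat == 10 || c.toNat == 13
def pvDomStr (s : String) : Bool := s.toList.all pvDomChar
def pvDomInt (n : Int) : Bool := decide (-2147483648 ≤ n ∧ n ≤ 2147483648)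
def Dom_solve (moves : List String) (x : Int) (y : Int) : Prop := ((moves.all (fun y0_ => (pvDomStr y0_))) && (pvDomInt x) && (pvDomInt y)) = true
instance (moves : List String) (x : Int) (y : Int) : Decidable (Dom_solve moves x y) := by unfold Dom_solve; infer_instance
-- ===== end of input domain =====

-- B tallies the moves once (list.count) and computes the end position in closed form.

-- ===== PORT A =====
def solve (moves : List String) (x : Int) (y : Int) : Bool :=
  let p := moves.foldl (fun (p : Int × Int) move =>
    if move = "NORTH" then (p.1, p.2 + 1)
    else if move = "SOUTH" then (p.1, p.2 - 1)
    else if move = "WEST" then (p.1 - 1, p.2)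
    else (p.1 + 1, p.2)) (0, 0)
  p.1 == x && p.2 == y

-- ===== PORT B =====
def solve_alt (moves : List String) (x : Int) (y : Int) : Bool :=
  let n : Int := PySem.List.count moves "NORTH"
  let s : Int := PySem.List.count moves "SOUTH"
  let w : Int := PySem.List.count moves "WEST"
  (((moves.length : Int) - n - s - w) - w == x) && (n - s == y)

-- ===== PRECONDITION & SPEC =====
def Spec_solve (moves : List String) (x : Int) (y : Int) (out : Bool) : Prop := out = solve_alt moves x y
instance (moves : List String) (x : Int) (y : Int) (out : Bool) : Decidable (Spec_solve moves x y out) := by unfold Spec_solve; infer_instance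

-- ===== CLAIM (what is proved, stated in full; the proofs are below) =====
def Claim_equal_solve : Prop := ∀ (moves : List String) (x : Int) (y : Int), Dom_solve moves x y → Spec_solve moves x y (solve moves x y)

-- ===== LEMMAS AND PROOFS =====
theorem solve_fold_closed (l : List String) (sx sy : Int) :
    l.foldl (fun (p : Int × Int) move =>
      if move = "NORTH" then (p.1, p.2 + 1)
      else if move = "SOUTH" then (p.1, p.2 - 1)
      else if move = "WEST" then (p.1 - 1, p.2)
      else (p.1 + 1, p.2)) (sx, sy)
    = (sx + ((l.length : Int) - l.count "NORTH" - l.count "SOUTH" - l.count "WEST") - l.count "WEST",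
       sy + (l.count "NORTH" : Int) - l.count "SOUTH") := by
  induction l generalizing sx sy with
  | nil => simp
  | cons h t ih =>
    simp only [List.foldl_cons]
    split_ifs with h1 h2 h3 <;>
      simp_all [ih, List.count_cons] <;> (try constructor) <;> push_cast <;>
      (try ring) <;> trivial

-- ===== VERDICT (by name: the statement is the Claim_ definition above) =====
theorem solve_spec : Claim_equal_solve := by
  intro moves x y _
  unfold Spec_solve solve solve_alt
  simp only [solve_fold_closed, PySem.List.count]
  norm_num
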